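-- pv_equiv track=rewrite | github.com/hitthecodelabs/url-redirect-file-uploader | app.py | distribute_urls
-- ===== SOURCE A (Python) =====
-- def distribute_urls(base_urls, redirect_urls):
--     output = []
--     base_len = len(base_urls)
--     redirect_len = len(redirect_urls)
--
--     if base_len >= redirect_len:
--         ratio = base_len // redirect_len
--         remainder = base_len % redirect_len
--         index = 0
--         for redirect_url in redirect_urls:
--             for _ in range(ratio):
--                 output.append((base_urls[index], redirect_url))
--                 index += 1
--             if remainder > 0:
--                 output.append((base_urls[index], redirect_url))
--                 index += 1
--                 remainder -= 1
--     else: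
--         ratio = redirect_len // base_len
--         remainder = redirect_len % base_len
--         index = 0
--         for base_url in base_urls:
--             for _ in range(ratio):
--                 output.append((base_url, redirect_urls[index]))
--                 index += 1
--             if remainder > 0:
--                 output.append((base_url, redirect_urls[index]))
--                 index += 1
--                 remainder -= 1
--
--     return output
-- ===== SOURCE B (Python) =====
-- def distribute_urls(base_urls, redirect_urls):
--     # Single flat pass with a closed-form index map (extras-first blocks),
--     # replacing A's nested block-building loops with mutable index/remainder.
--     bl, rl = len(base_urls), len(redirect_urls)
--     if bl >= rl:
--         q, r = divmod(bl, rl)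
--         return [(base_urls[i],
--                  redirect_urls[i // (q + 1) if i < r * (q + 1)
--                                else r + (i - r * (q + 1)) // q])
--                 for i in range(bl)]
--     else:
--         q, r = divmod(rl, bl)
--         return [(base_urls[i // (q + 1) if i < r * (q + 1)
--                            else r + (i - r * (q + 1)) // q],
--                  redirect_urls[i])
--                 for i in range(rl)]
-- ===== Notes on version B (the rewrite author's own statement) =====
-- stated objective: simpler
-- what changed: A builds the output with nested block-building loops over the shorter list, mutating a running index and decrementing a remainder; B does one flat comprehension over the longer list, computing the partner index with a closed-form extras-first block formula i//(q+1) if i<r*(q+1) else r+(i-r*(q+1))//q.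
import Mathlib
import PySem

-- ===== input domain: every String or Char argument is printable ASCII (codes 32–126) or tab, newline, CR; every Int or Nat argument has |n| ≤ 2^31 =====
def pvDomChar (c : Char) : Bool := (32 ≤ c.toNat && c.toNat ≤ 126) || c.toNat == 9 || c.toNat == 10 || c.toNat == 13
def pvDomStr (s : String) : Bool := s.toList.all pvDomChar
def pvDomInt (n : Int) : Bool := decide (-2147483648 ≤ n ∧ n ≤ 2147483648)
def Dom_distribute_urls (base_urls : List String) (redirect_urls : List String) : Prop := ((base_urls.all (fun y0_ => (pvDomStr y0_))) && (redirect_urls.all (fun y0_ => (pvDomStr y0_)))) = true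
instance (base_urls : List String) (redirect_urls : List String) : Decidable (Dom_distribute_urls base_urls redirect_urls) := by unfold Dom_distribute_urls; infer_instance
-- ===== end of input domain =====

-- B replaces A's nested block-building loops (mutable index + remainder) with one flat
-- map over the longer list using a closed-form extras-first block-index formula (simpler).


-- ===== PORT A =====
def distribute_urls (base_urls : List String) (redirect_urls : List String) : List (String × String) :=
  let base_len : Int := base_urls.length
  let redirect_len : Int := redirect_urls.length
  if base_len ≥ redirect_len then
    let ratio := PySem.Int.floordiv base_len redirect_len
    let remainder := PySem.Int.mod base_len redirect_len
    (redirect_urls.foldl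
      (fun (st : List (String × String) × Int × Int) redirect_url =>
        let inner := (PySem.List.pyRange 0 ratio 1).foldl
          (fun (p : List (String × String) × Int) _ =>
            (p.1 ++ [(PySem.List.pyGetD base_urls p.2 "", redirect_url)], p.2 + 1))
          (st.1, st.2.1)
        if st.2.2 > 0 then
          (inner.1 ++ [(PySem.List.pyGetD base_urls inner.2 "", redirect_url)], inner.2 + 1, st.2.2 - 1)
        else (inner.1, inner.2, st.2.2))
      ([], 0, remainder)).1
  else
    let ratio := PySem.Int.floordiv redirect_len base_len
    let remainder := PySem.Int.mod redirect_len base_len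
    (base_urls.foldl
      (fun (st : List (String × String) × Int × Int) base_url =>
        let inner := (PySem.List.pyRange 0 ratio 1).foldl
          (fun (p : List (String × String) × Int) _ =>
            (p.1 ++ [(base_url, PySem.List.pyGetD redirect_urls p.2 "")], p.2 + 1))
          (st.1, st.2.1)
        if st.2.2 > 0 then
          (inner.1 ++ [(base_url, PySem.List.pyGetD redirect_urls inner.2 "")], inner.2 + 1, st.2.2 - 1)
        else (inner.1, inner.2, st.2.2))
      ([], 0, remainder)).1

-- ===== PORT B =====
def distribute_urls_alt (base_urls : List String) (redirect_urls : List String) : List (String × String) :=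
  let base_len : Int := base_urls.length
  let redirect_len : Int := redirect_urls.length
  if base_len ≥ redirect_len then
    let q := PySem.Int.floordiv base_len redirect_len
    let r := PySem.Int.mod base_len redirect_len
    (PySem.List.pyRange 0 base_len 1).map (fun i =>
      (PySem.List.pyGetD base_urls i "",
       PySem.List.pyGetD redirect_urls
         (if i < r * (q + 1) then PySem.Int.floordiv i (q + 1)
          else r + PySem.Int.floordiv (i - r * (q + 1)) q) ""))
  else
    let q := PySem.Int.floordiv redirect_len base_len
    let r := PySem.Int.mod redirect_len base_len
    (PySem.List.pyRange 0 redirect_len 1).map (fun i =>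
      (PySem.List.pyGetD base_urls
         (if i < r * (q + 1) then PySem.Int.floordiv i (q + 1)
          else r + PySem.Int.floordiv (i - r * (q + 1)) q) "",
       PySem.List.pyGetD redirect_urls i ""))

-- ===== PRECONDITION & SPEC =====
-- A raises ZeroDivisionError (the shorter list's length is the divisor) when either list is
-- empty; B raises there too.  Pre_ excludes exactly those inputs.
def Pre_distribute_urls (base_urls : List String) (redirect_urls : List String) : Prop :=
  base_urls ≠ [] ∧ redirect_urls ≠ []
instance (base_urls : List String) (redirect_urls : List String) : Decidable (Pre_distribute_urls base_urls redirect_urls) := by unfold Pre_distribute_urls; infer_instance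
def pvWitness_distribute_urls : List String × List String := (["a", "b", "c"], ["x", "y"])

def Spec_distribute_urls (base_urls : List String) (redirect_urls : List String) (out : List (String × String)) : Prop := out = distribute_urls_alt base_urls redirect_urls
instance (base_urls : List String) (redirect_urls : List String) (out : List (String × String)) : Decidable (Spec_distribute_urls base_urls redirect_urls out) := by unfold Spec_distribute_urls; infer_instance

-- ===== CLAIM (what is proved, stated in full; the proofs are below) =====
def Claim_equal_distribute_urls : Prop := ∀ (base_urls : List String) (redirect_urls : List String), Dom_distribute_urls base_urls redirect_urls → Pre_distribute_urls base_urls redirect_urls → Spec_distribute_urls base_urls redirect_urls (distribute_urls base_urls redirect_urls)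

-- ===== LEMMAS AND PROOFS =====

def pvBlocks {β γ : Type} (g : Int → β → γ) (S : List β) (q : Nat) (idx rem : Int) : List γ :=
  match S with
  | [] => []
  | s :: rest =>
    let sz : Nat := q + (if 0 < rem then 1 else 0)
    ((List.range sz).map (fun (t : Nat) => g (idx + (t : Int)) s)) ++
      pvBlocks g rest q (idx + (sz : Int)) (if 0 < rem then rem - 1 else rem)


lemma pv_inner_fold {γ : Type} (g : Int → γ) (k : Nat) :
    ∀ (out : List γ) (i : Int),
      (PySem.List.pyRange 0 (k : Int) 1).foldl
          (fun (p : List γ × Int) _ => (p.1 ++ [g p.2], p.2 + 1)) (out, i)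
        = (out ++ (List.range k).map (fun t => g (i + (t : Int))), i + (k : Int)) := by
  induction k with
  | zero => intro out i; simp
  | succ k ih =>
    intro out i
    have hsplit : PySem.List.pyRange 0 ((k + 1 : Nat) : Int) 1
        = PySem.List.pyRange 0 (k : Int) 1 ++ [(k : Int)] := by
      push_cast
      exact PySem.List.pyRange_one_succ_right (by positivity)
    rw [hsplit, List.foldl_append, ih]
    simp [List.range_succ]
    omega


lemma pv_a_fold {β γ : Type} (g : Int → β → γ) (q : Nat) :
    ∀ (S : List β) (out : List γ) (idx rem : Int),
      (S.foldl
        (fun (st : List γ × Int × Int) s =>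
          let inner := (PySem.List.pyRange 0 (q : Int) 1).foldl
            (fun (p : List γ × Int) _ => (p.1 ++ [g p.2 s], p.2 + 1)) (st.1, st.2.1)
          if st.2.2 > 0 then
            (inner.1 ++ [g inner.2 s], inner.2 + 1, st.2.2 - 1)
          else (inner.1, inner.2, st.2.2))
        (out, idx, rem)).1
      = out ++ pvBlocks g S q idx rem := by
  intro S
  induction S with
  | nil => intro out idx rem; simp [pvBlocks]
  | cons s rest ih =>
    intro out idx rem
    rw [List.foldl_cons]
    by_cases h : 0 < rem
    · rw [if_pos (by simpa using h), ih, pv_inner_fold (fun i => g i s) q out idx]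
      simp [pvBlocks, h, List.range_succ, List.append_assoc, add_assoc, ← List.map_eq_flatMap, List.map_map, Function.comp]
    · rw [if_neg (by simpa using h), ih, pv_inner_fold (fun i => g i s) q out idx]
      simp [pvBlocks, h, List.append_assoc, ← List.map_eq_flatMap, List.map_map, Function.comp]

lemma pv_b_map {β γ : Type} (f0 : Int → β → γ) (S : List β) (dS : β) (n : Nat)
    (hm : 0 < S.length) (hnm : S.length ≤ n) :
    ∀ (S' : List β) (j : Nat) (rem : Int), S.drop j = S' → j + S'.length = S.length →
      ((j < n % S.length ∧ rem = ((n % S.length : Nat) : Int) - (j : Int)) ∨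
        (n % S.length ≤ j ∧ rem ≤ 0)) →
      (PySem.List.pyRange ((j * (n / S.length) + min j (n % S.length) : Nat) : Int) (n : Int) 1).map
          (fun i => f0 i (PySem.List.pyGetD S
            (if i < ((n % S.length : Nat) : Int) * (((n / S.length : Nat) : Int) + 1)
             then PySem.Int.floordiv i (((n / S.length : Nat) : Int) + 1)
             else ((n % S.length : Nat) : Int) +
               PySem.Int.floordiv (i - ((n % S.length : Nat) : Int) * (((n / S.length : Nat) : Int) + 1)) ((n / S.length : Nat) : Int)) dS))
        = pvBlocks f0 S' (n / S.length) ((j * (n / S.length) + min j (n % S.length) : Nat) : Int) rem := by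
  set m := S.length with hmdef
  set q := n / m with hqdef
  set r := n % m with hrdef
  have hq1 : 1 ≤ q := (Nat.one_le_div_iff hm).mpr hnm
  have hrm : r < m := Nat.mod_lt _ hm
  have hn : m * q + r = n := Nat.div_add_mod n m
  intro S'
  induction S' with
  | nil =>
    intro j rem hdrop hlen _
    have hj : j = m := by simpa using hlen
    have ho : j * q + min j r = n := by
      subst hj
      have : min m r = r := min_eq_right (le_of_lt hrm)
      rw [this]; exact hn
    rw [ho]
    simp [pvBlocks, PySem.List.pyRange_one_eq_nil (le_refl (n : Int))]
  | cons s rest ih =>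
    intro j rem hdrop hlen hrem
    have hjm : j < m := by simp at hlen; omega
    have hpos : 0 < rem ↔ j < r := by
      rcases hrem with ⟨h1, h2⟩ | ⟨h1, h2⟩
      · omega
      · omega
    set o := j * q + min j r with hodef
    set o' := (j+1) * q + min (j+1) r with ho'def
    have hoo' : o + (q + (if j < r then 1 else 0)) = o' := by
      by_cases h : j < r
      · have h1 : min j r = j := min_eq_left (le_of_lt h)
        have h2 : min (j+1) r = j+1 := min_eq_left h
        simp only [hodef, ho'def, h, if_true, h1, h2, Nat.succ_mul]
        omega
      · have h1 : min j r = r := by omega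
        have h2 : min (j+1) r = r := by omega
        simp only [hodef, ho'def, h, if_false, h1, h2, Nat.succ_mul]
        omega
    have ho'n : o' ≤ n := by
      have h1 : (j+1) * q ≤ m * q := Nat.mul_le_mul_right q hjm
      have h2 : min (j+1) r ≤ r := Nat.min_le_right _ _
      omega
    have hSj : S.getD j dS = s := by
      have h0 : (S.drop j)[0]? = some s := by rw [hdrop]; rfl
      rw [List.getElem?_drop] at h0
      have h0' : S[j]? = some s := by simpa using h0
      simp [List.getD, h0']
    -- closed-form index equals j on block j
    set sz : Nat := q + (if j < r then 1 else 0) with hszdef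
    have hgid : ∀ k : Nat, k < sz →
        (if ((o:Int) + (k:Int)) < ((r:Nat):Int) * (((q:Nat):Int) + 1)
         then PySem.Int.floordiv ((o:Int) + k) (((q:Nat):Int) + 1)
         else ((r:Nat):Int) + PySem.Int.floordiv (((o:Int) + k) - ((r:Nat):Int) * (((q:Nat):Int) + 1)) ((q:Nat):Int))
        = (j : Int) := by
      intro k hk
      by_cases h : j < r
      · have h1 : min j r = j := min_eq_left (le_of_lt h)
        have hkq : k < q + 1 := by simp [hszdef, h] at hk; omega
        have hoj : o = j * (q + 1) := by simp [hodef, h1, Nat.mul_succ]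
        have hjr1 : (j+1) * (q+1) ≤ r * (q+1) := Nat.mul_le_mul_right (q+1) h
        have hcond : ((o:Int) + k) < ((r:Nat):Int) * (((q:Nat):Int) + 1) := by
          have hnat : o + k < r * (q + 1) := by
            have : o + k < (j+1) * (q+1) := by rw [hoj, Nat.succ_mul]; omega
            omega
          exact_mod_cast hnat
        rw [if_pos hcond]
        have e1 : ((o:Int) + k) = ((o + k : Nat) : Int) := by push_cast; ring
        have e2 : (((q:Nat):Int) + 1) = ((q + 1 : Nat) : Int) := by push_cast; ring
        rw [e1, e2, PySem.Int.floordiv_natCast]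
        have : (o + k) / (q + 1) = j := by
          rw [hoj, Nat.add_comm, Nat.add_mul_div_right _ _ (Nat.succ_pos q), Nat.div_eq_of_lt hkq]
          omega
        rw [this]
      · have h1 : min j r = r := by omega
        have hkq : k < q := by simp [hszdef, h] at hk; omega
        obtain ⟨d, hd⟩ : ∃ d, j = r + d := ⟨j - r, by omega⟩
        have hoj : o = r * (q + 1) + d * q := by
          have : j * q = r * q + d * q := by rw [hd, Nat.add_mul]
          have h2 : r * (q + 1) = r * q + r := by rw [Nat.mul_succ]
          omega
        have hcond : ¬ (((o:Int) + k) < ((r:Nat):Int) * (((q:Nat):Int) + 1)) := by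
          have hnat : r * (q + 1) ≤ o + k := by omega
          exact not_lt.mpr (by exact_mod_cast hnat)
        rw [if_neg hcond]
        have e1 : ((o:Int) + k) - ((r:Nat):Int) * (((q:Nat):Int) + 1) = ((d * q + k : Nat) : Int) := by
          have : (o : Int) = ((r * (q+1) + d * q : Nat) : Int) := by exact_mod_cast hoj
          rw [this]; push_cast; ring
        rw [e1, PySem.Int.floordiv_natCast]
        have : (d * q + k) / q = d := by
          rw [Nat.add_comm, Nat.add_mul_div_right _ _ (by omega : 0 < q), Nat.div_eq_of_lt hkq]
          omega
        rw [this, hd]; push_cast; ring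
    -- split the flat range at o'
    have hsplit : PySem.List.pyRange ((o:Nat):Int) (n:Int) 1
        = PySem.List.pyRange ((o:Nat):Int) ((o':Nat):Int) 1 ++ PySem.List.pyRange ((o':Nat):Int) (n:Int) 1 :=
      PySem.List.pyRange_one_append _ _ _ (by exact_mod_cast Nat.le.intro hoo') (by exact_mod_cast ho'n)
    rw [hsplit, List.map_append]
    -- first segment is block j
    have hfirst : (PySem.List.pyRange ((o:Nat):Int) ((o':Nat):Int) 1).map
          (fun i => f0 i (PySem.List.pyGetD S
            (if i < ((r:Nat):Int) * (((q:Nat):Int) + 1)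
             then PySem.Int.floordiv i (((q:Nat):Int) + 1)
             else ((r:Nat):Int) + PySem.Int.floordiv (i - ((r:Nat):Int) * (((q:Nat):Int) + 1)) ((q:Nat):Int)) dS))
        = (List.range sz).map (fun (t : Nat) => f0 ((o:Int) + (t:Int)) s) := by
      rw [PySem.List.pyRange_one, List.map_map]
      have hlen2 : (((o':Nat):Int) - ((o:Nat):Int)).toNat = sz := by omega
      rw [hlen2]
      apply List.map_congr_left
      intro k hk
      have hk' : k < sz := List.mem_range.mp hk
      simp only [Function.comp]
      rw [hgid k hk', PySem.List.pyGetD_natCast, hSj]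
    rw [hfirst]
    -- second segment via ih at j+1
    have hdrop' : S.drop (j+1) = rest := by
      have h1 : S.drop (j+1) = (S.drop j).drop 1 := by rw [List.drop_drop]
      rw [h1, hdrop]; rfl
    have hlen' : (j+1) + rest.length = m := by simp at hlen; omega
    have hrem' : ((j+1) < r ∧ (if 0 < rem then rem - 1 else rem) = ((r:Nat):Int) - ((j+1:Nat):Int)) ∨
        (r ≤ (j+1) ∧ (if 0 < rem then rem - 1 else rem) ≤ 0) := by
      by_cases hh : 0 < rem <;> simp [hh] <;> omega
    have hsecond := ih (j+1) (if 0 < rem then rem - 1 else rem) hdrop' hlen' hrem'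
    rw [hsecond]
    -- assemble with pvBlocks
    simp only [pvBlocks]
    have hszeq : q + (if (0:Int) < rem then (1:Nat) else 0) = sz := by
      by_cases hh : 0 < rem
      · simp [hh, hszdef, hpos.mp hh]
      · simp [hh, hszdef]
        omega
    rw [hszeq]
    have hocast : ((o:Int) + (sz:Int)) = ((o':Nat):Int) := by
      have := hoo'; push_cast [← this, hszdef]; ring
    rw [hocast]

-- ===== VERDICT (by name: the statement is the Claim_ definition above) =====
theorem distribute_urls_spec : Claim_equal_distribute_urls := by
  unfold Claim_equal_distribute_urls Spec_distribute_urls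
  intro B R _ hpre
  obtain ⟨hB, hR⟩ := hpre
  have hBl : 0 < B.length := List.length_pos_iff.mpr hB
  have hRl : 0 < R.length := List.length_pos_iff.mpr hR
  by_cases h : (R.length : Int) ≤ (B.length : Int)
  · have hnm : R.length ≤ B.length := by exact_mod_cast h
    rw [distribute_urls, distribute_urls_alt]
    simp only [ge_iff_le, if_pos h, PySem.Int.floordiv_natCast, PySem.Int.mod_natCast]
    rw [pv_a_fold (fun i s => (PySem.List.pyGetD B i "", s)) (B.length / R.length) R [] 0
      ((B.length % R.length : Nat) : Int)]
    have hb := pv_b_map (fun i s => (PySem.List.pyGetD B i "", s)) R "" B.length hRl hnm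
      R 0 ((B.length % R.length : Nat) : Int) (by simp) (by simp)
      (by by_cases hr0 : 0 < B.length % R.length
          · left; constructor
            · exact hr0
            · simp
          · right; constructor
            · omega
            · simp; omega)
    simp only [Nat.zero_mul, Nat.zero_min, Nat.add_zero, Nat.cast_zero] at hb
    rw [← hb]
    simp
  · have hnm : B.length ≤ R.length := by omega
    rw [distribute_urls, distribute_urls_alt]
    simp only [ge_iff_le, if_neg h, PySem.Int.floordiv_natCast, PySem.Int.mod_natCast]
    rw [pv_a_fold (fun i s => (s, PySem.List.pyGetD R i "")) (R.length / B.length) B [] 0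
      ((R.length % B.length : Nat) : Int)]
    have hb := pv_b_map (fun i s => (s, PySem.List.pyGetD R i "")) B "" R.length hBl hnm
      B 0 ((R.length % B.length : Nat) : Int) (by simp) (by simp)
      (by by_cases hr0 : 0 < R.length % B.length
          · left; constructor
            · exact hr0
            · simp
          · right; constructor
            · omega
            · simp; omega)
    simp only [Nat.zero_mul, Nat.zero_min, Nat.add_zero, Nat.cast_zero] at hb
    rw [← hb]
    simp
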